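-- pv_equiv track=rewrite | github.com/marcelo-torres/green-scheduler | src/scheduling/energy_usage_calculator.py | _calculate
-- ===== SOURCE A (Python) =====
-- def _calculate(power_events):
--     # Power along iterations
--     green_power = 0
--     requested_power = 0
--
--     # Energy used
--     brown_energy_used = 0
--     green_energy_not_used = 0
--     total_energy = 0
--
--     start_time = 0
--     for power_event in power_events:
--
--         time, event_type, power = power_event
--
--         # Convert power and duration to energy
--         event_duration = time - start_time
--         green_energy = event_duration * green_power
--         requested_energy = event_duration * requested_power
--
--         if requested_energy > green_energy:
--             brown_energy_used += requested_energy - green_energy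
--
--         elif requested_energy < green_energy:
--             green_energy_not_used += green_energy - requested_energy
--
--         total_energy += requested_energy
--
--         if event_type == 'green_power':
--             green_power = power
--         elif event_type == 'task':
--             requested_power += power
--         else:
--             raise Exception(f'No eventy type {event_type} defined')
--
--         start_time = time
--
--     return brown_energy_used, green_energy_not_used, total_energy
-- ===== SOURCE B (Python) =====
-- def _calculate(power_events):
--     # Pass 1: record one (duration, green_power, requested_power) interval per
--     # event, then apply the event's state update (raising on unknown types).
--     intervals = []
--     start_time = 0
--     green_power = 0
--     requested_power = 0
--     for time, event_type, power in power_events: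
--         intervals.append((time - start_time, green_power, requested_power))
--         if event_type == 'green_power':
--             green_power = power
--         elif event_type == 'task':
--             requested_power += power
--         else:
--             raise Exception(f'No eventy type {event_type} defined')
--         start_time = time
--     # Pass 2: three independent sums over the recorded intervals.
--     brown_energy_used = sum(d * (r - g) for d, g, r in intervals if d * r > d * g)
--     green_energy_not_used = sum(d * (g - r) for d, g, r in intervals if d * g > d * r)
--     total_energy = sum(d * r for d, g, r in intervals)
--     return brown_energy_used, green_energy_not_used, total_energy
-- ===== Notes on version B (the rewrite author's own statement) =====
-- stated objective: alternative
-- what changed: B splits A's single accumulating loop into a first pass that materialises (duration, green_power, requested_power) intervals and a second phase of three independent generator-expression sums.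
-- outside the precondition, e.g. on _calculate([(5, 'solar', 3)]): A raises Exception, B raises Exception
import Mathlib
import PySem

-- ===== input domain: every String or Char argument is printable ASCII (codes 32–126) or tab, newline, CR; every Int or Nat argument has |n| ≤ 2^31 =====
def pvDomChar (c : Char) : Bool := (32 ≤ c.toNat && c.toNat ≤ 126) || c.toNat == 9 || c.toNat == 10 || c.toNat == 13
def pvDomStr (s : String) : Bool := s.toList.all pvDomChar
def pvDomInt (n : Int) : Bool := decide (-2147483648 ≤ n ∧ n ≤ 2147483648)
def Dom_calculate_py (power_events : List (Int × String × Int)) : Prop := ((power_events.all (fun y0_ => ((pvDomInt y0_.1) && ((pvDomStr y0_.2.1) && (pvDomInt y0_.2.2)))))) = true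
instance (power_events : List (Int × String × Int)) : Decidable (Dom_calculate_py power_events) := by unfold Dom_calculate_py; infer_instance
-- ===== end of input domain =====

-- B records (duration, green_power, requested_power) intervals in a first pass,
-- then computes the three energy totals as independent sums (alternative decomposition, same cost).


-- ===== PORT A =====
-- one loop step of A; state = (green_power, requested_power, brown, green_not_used, total, start_time)
def calcStepA (st : Int × Int × Int × Int × Int × Int) (pe : Int × String × Int) :
    Int × Int × Int × Int × Int × Int :=
  let (gp, rp, brown, gnu, total, start) := st
  let (time, event_type, power) := pe
  let event_duration := time - start
  let green_energy := event_duration * gp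
  let requested_energy := event_duration * rp
  let brown' := if requested_energy > green_energy then brown + (requested_energy - green_energy) else brown
  let gnu' := if ¬ (requested_energy > green_energy) ∧ requested_energy < green_energy
              then gnu + (green_energy - requested_energy) else gnu
  let total' := total + requested_energy
  if event_type = "green_power" then (power, rp, brown', gnu', total', time)
  else if event_type = "task" then (gp, rp + power, brown', gnu', total', time)
  else (gp, rp, brown', gnu', total', time)  -- Python raises here; excluded by Pre_

def calculate_py (power_events : List (Int × String × Int)) : Int × Int × Int :=
  let st := power_events.foldl calcStepA (0, 0, 0, 0, 0, 0)
  (st.2.2.1, st.2.2.2.1, st.2.2.2.2.1)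

-- ===== PORT B =====
-- first pass of B: build the (duration, green_power, requested_power) intervals
def calcIntervals : List (Int × String × Int) → Int → Int → Int → List (Int × Int × Int)
  | [], _, _, _ => []
  | (time, event_type, power) :: rest, start, gp, rp =>
    (time - start, gp, rp) ::
      (if event_type = "green_power" then calcIntervals rest time power rp
       else if event_type = "task" then calcIntervals rest time gp (rp + power)
       else calcIntervals rest time gp rp)  -- Python raises here; excluded by Pre_

def calculate_py_alt (power_events : List (Int × String × Int)) : Int × Int × Int :=
  let intervals := calcIntervals power_events 0 0 0
  let brown := ((intervals.filter (fun i => i.1 * i.2.2 > i.1 * i.2.1)).map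
                  (fun i => i.1 * (i.2.2 - i.2.1))).sum
  let gnu := ((intervals.filter (fun i => i.1 * i.2.1 > i.1 * i.2.2)).map
                  (fun i => i.1 * (i.2.1 - i.2.2))).sum
  let total := (intervals.map (fun i => i.1 * i.2.2)).sum
  (brown, gnu, total)

-- ===== PRECONDITION & SPEC =====
-- Pre_ excludes exactly the inputs containing an unknown event_type, on which A raises Exception.
def Pre_calculate_py (power_events : List (Int × String × Int)) : Prop :=
  (power_events.all (fun pe => pe.2.1 == "green_power" || pe.2.1 == "task")) = true
instance (power_events : List (Int × String × Int)) : Decidable (Pre_calculate_py power_events) := by unfold Pre_calculate_py; infer_instance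

def pvWitness_calculate_py : (List (Int × String × Int)) :=
  [(3, "green_power", 5), (4, "task", 2), (10, "task", 1)]

def Spec_calculate_py (power_events : List (Int × String × Int)) (out : Int × Int × Int) : Prop := out = calculate_py_alt power_events
instance (power_events : List (Int × String × Int)) (out : Int × Int × Int) : Decidable (Spec_calculate_py power_events out) := by unfold Spec_calculate_py; infer_instance

-- ===== CLAIM (what is proved, stated in full; the proofs are below) =====
def Claim_equal_calculate_py : Prop := ∀ (power_events : List (Int × String × Int)), Dom_calculate_py power_events → Pre_calculate_py power_events → Spec_calculate_py power_events (calculate_py power_events)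

-- ===== LEMMAS AND PROOFS =====

def calcSums (ivs : List (Int × Int × Int)) : Int × Int × Int :=
  (((ivs.filter (fun i => i.1 * i.2.2 > i.1 * i.2.1)).map (fun i => i.1 * (i.2.2 - i.2.1))).sum,
   ((ivs.filter (fun i => i.1 * i.2.1 > i.1 * i.2.2)).map (fun i => i.1 * (i.2.1 - i.2.2))).sum,
   (ivs.map (fun i => i.1 * i.2.2)).sum)

set_option maxHeartbeats 1600000 in
theorem calc_loop_eq (pe : List (Int × String × Int)) :
    ∀ (start gp rp b g t : Int),
      Pre_calculate_py pe →
      (let st := pe.foldl calcStepA (gp, rp, b, g, t, start)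
       (st.2.2.1, st.2.2.2.1, st.2.2.2.2.1)) =
        (b + (calcSums (calcIntervals pe start gp rp)).1,
         g + (calcSums (calcIntervals pe start gp rp)).2.1,
         t + (calcSums (calcIntervals pe start gp rp)).2.2) := by
  induction pe with
  | nil => intro start gp rp b g t _; simp [calcSums, calcIntervals, List.foldl]
  | cons hd tl ih =>
    intro start gp rp b g t hpre
    obtain ⟨time, event_type, power⟩ := hd
    have hpre' : Pre_calculate_py tl := by
      simp [Pre_calculate_py, List.all_cons] at hpre ⊢; exact hpre.2
    have hty : event_type = "green_power" ∨ event_type = "task" := by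
      simp [Pre_calculate_py, List.all_cons] at hpre
      rcases hpre.1 with h | h
      · exact Or.inl h
      · exact Or.inr h
    simp only [List.foldl_cons]
    rcases hty with h | h <;> subst h <;>
      simp only [calcStepA, calcIntervals, reduceIte, String.reduceEq]
    · rw [ih _ _ _ _ _ _ hpre']
      simp only [calcSums, List.filter_cons, List.sum_cons, List.map, gt_iff_lt]
      split_ifs with h1 h2 <;> simp_all <;> (repeat' constructor) <;> try ring
      all_goals exfalso; linarith
    · rw [ih _ _ _ _ _ _ hpre']
      simp only [calcSums, List.filter_cons, List.sum_cons, List.map, gt_iff_lt]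
      split_ifs with h1 h2 <;> simp_all <;> (repeat' constructor) <;> try ring
      all_goals exfalso; linarith

-- ===== VERDICT (by name: the statement is the Claim_ definition above) =====
theorem calculate_py_spec : Claim_equal_calculate_py := by
  intro pe _ hpre
  show _ = _
  have := calc_loop_eq pe 0 0 0 0 0 0 hpre
  simp only [calculate_py, calculate_py_alt, calcSums] at this ⊢
  rw [this]
  simp
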